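-- pv_equiv track=rewrite | github.com/RebeccaSelvaggini/Scientific-Computing-projects | project1.py | complete_shuffle
-- ===== SOURCE A (Python) =====
-- def complete_shuffle(k):
--     " " " Rebecca Selvaggini " " "
--     L = [*range(1, 2*k +1)]
--     s = [0]*(2*k)
--     f = [0]*(2*k)
--     for m in range(1, k+1) :
--         tmp = []
--         for i in range(0,m):
--             tmp.append(L[i+m])
--             tmp.append(L[i])
--         L = tmp + L[2*m:]
--         f[L[0]-1] = f[L[0]-1] + 1
--         if s[L[0]-1] == 0 :
--             s[L[0]-1] = m
--     return L[0:3], s[L[0]-1], f[L[0]-1]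
-- ===== SOURCE B (Python) =====
-- def complete_shuffle(k):
--     """Backward position-tracing: never materializes the shuffled list.
--     The round-m shuffle sends old position m+i -> 2i and old position i -> 2i+1
--     (positions >= 2m fixed), so the value at position p after rounds 1..t is
--     found by tracing p backward through the inverse maps; original value = pos+1."""
--     def value_after(t, p):
--         for m in range(t, 0, -1):
--             if p < 2 * m:
--                 p = m + p // 2 if p % 2 == 0 else p // 2
--         return p + 1
--     heads = [value_after(m, 0) for m in range(1, k + 1)]
--     v = heads[-1]
--     first3 = [value_after(k, p) for p in range(min(3, 2 * k))]
--     return first3, heads.index(v) + 1, heads.count(v)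
-- ===== Notes on version B (the rewrite author's own statement) =====
-- stated objective: alternative
-- what changed: B never materializes the shuffled list: it computes any needed entry by tracing its position backward through each round's inverse permutation (position arithmetic with // and %), derives the per-round heads from trace(m,0), and gets s and f afterwards as heads.index(v)+1 and heads.count(v); A rebuilds the whole list every round and updates per-value s/f arrays online.
import Mathlib
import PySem

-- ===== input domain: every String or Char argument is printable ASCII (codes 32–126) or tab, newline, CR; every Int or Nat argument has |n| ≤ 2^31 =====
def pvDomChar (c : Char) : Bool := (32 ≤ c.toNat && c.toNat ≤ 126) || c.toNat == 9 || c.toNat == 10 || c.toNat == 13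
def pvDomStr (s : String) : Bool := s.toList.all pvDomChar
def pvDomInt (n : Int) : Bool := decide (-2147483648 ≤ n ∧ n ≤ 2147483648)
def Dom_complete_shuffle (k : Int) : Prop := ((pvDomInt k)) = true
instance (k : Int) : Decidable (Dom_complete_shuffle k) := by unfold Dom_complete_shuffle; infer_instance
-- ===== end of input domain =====

-- B replaces A's list-rebuilding simulation by backward position tracing through each
-- round's inverse permutation (never materializing the shuffled list); objective: alternative.


-- ===== PORT A =====
-- loop body of A's 'for m in range(1, k+1)': state (L, s, f)
def csStepA (st : List Int × List Int × List Int) (m : Int) : List Int × List Int × List Int :=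
  let L := st.1
  let s := st.2.1
  let f := st.2.2
  let tmp := (PySem.List.pyRange 0 m 1).foldl
      (fun tmp i => (tmp ++ [PySem.List.pyGetD L (i + m) 0]) ++ [PySem.List.pyGetD L i 0]) []
  let L2 := tmp ++ PySem.List.slice L (some (2 * m)) none
  let hd := PySem.List.pyGetD L2 0 0
  let f2 := PySem.List.pySetD f (hd - 1) (PySem.List.pyGetD f (hd - 1) 0 + 1)
  let s2 := if PySem.List.pyGetD s (hd - 1) 0 = 0 then PySem.List.pySetD s (hd - 1) m else s
  (L2, s2, f2)

def complete_shuffle (k : Int) : List Int × Int × Int :=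
  let L : List Int := PySem.List.pyRange 1 (2 * k + 1) 1
  let s : List Int := List.replicate (2 * k).toNat 0
  let f : List Int := List.replicate (2 * k).toNat 0
  let st := (PySem.List.pyRange 1 (k + 1) 1).foldl csStepA (L, s, f)
  let hd := PySem.List.pyGetD st.1 0 0
  (PySem.List.slice st.1 (some 0) (some 3),
   PySem.List.pyGetD st.2.1 (hd - 1) 0,
   PySem.List.pyGetD st.2.2 (hd - 1) 0)

-- ===== PORT B =====
-- one backward step of B's value_after loop: undo round m's position map
def csTraceStep (p : Int) (m : Int) : Int :=
  if p < 2 * m then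
    (if PySem.Int.mod p 2 = 0 then m + PySem.Int.floordiv p 2 else PySem.Int.floordiv p 2)
  else p

-- B's value_after(t, p): trace position p back through rounds t, t-1, …, 1
def csValueAfter (t : Int) (p : Int) : Int :=
  (PySem.List.pyRange t 0 (-1)).foldl csTraceStep p + 1

def complete_shuffle_alt (k : Int) : List Int × Int × Int :=
  let heads := (PySem.List.pyRange 1 (k + 1) 1).map (fun m => csValueAfter m 0)
  let v := PySem.List.pyGetD heads (-1) 0
  let first3 := (PySem.List.pyRange 0 (min 3 (2 * k)) 1).map (fun p => csValueAfter k p)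
  (first3,
   (((PySem.List.index? heads v).getD 0 : Nat) : Int) + 1,
   (PySem.List.count heads v : Int))

-- ===== PRECONDITION & SPEC =====
-- Pre_ excludes k ≤ 0, where both A and B raise IndexError (A on L[0] of the empty list, B on heads[-1]).
def Pre_complete_shuffle (k : Int) : Prop := 1 ≤ k
instance (k : Int) : Decidable (Pre_complete_shuffle k) := by unfold Pre_complete_shuffle; infer_instance
def pvWitness_complete_shuffle : Int := (3)

def Spec_complete_shuffle (k : Int) (out : List Int × Int × Int) : Prop := out = complete_shuffle_alt k
instance (k : Int) (out : List Int × Int × Int) : Decidable (Spec_complete_shuffle k out) := by unfold Spec_complete_shuffle; infer_instance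

-- ===== CLAIM (what is proved, stated in full; the proofs are below) =====
def Claim_equal_complete_shuffle : Prop := ∀ (k : Int), Dom_complete_shuffle k → Pre_complete_shuffle k → Spec_complete_shuffle k (complete_shuffle k)

-- ===== LEMMAS AND PROOFS =====

-- heads recorded after rounds 1..n, expressed through B's backward trace
def csHeads (n : Nat) : List Int := (List.range n).map (fun (i : Nat) => csValueAfter ((i : Int) + 1) 0)

-- unrolling the backward trace by its outermost (largest-m) step
theorem csValueAfter_succ (n : Nat) (p : Int) :
    csValueAfter ((n : Int) + 1) p = csValueAfter n (csTraceStep p ((n : Int) + 1)) := by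
  unfold csValueAfter
  rw [PySem.List.pyRange_neg_one_cons (show (0:Int) < (n : Int) + 1 by omega)]
  norm_num

-- one backward step stays inside [0, 2k)
theorem csTraceStep_bounds (k m p : Int) (_hm1 : 1 ≤ m) (hmk : m ≤ k)
    (hp0 : 0 ≤ p) (hpk : p < 2 * k) :
    0 ≤ csTraceStep p m ∧ csTraceStep p m < 2 * k := by
  unfold csTraceStep
  rw [PySem.Int.mod_eq_emod_of_pos (by omega), PySem.Int.floordiv_eq_ediv_of_pos (by omega)]
  split_ifs <;> omega

-- the whole backward trace stays inside [0, 2k)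
theorem csTraceFold_bounds (n : Nat) (k p : Int) (hn : (n : Int) ≤ k)
    (hp0 : 0 ≤ p) (hpk : p < 2 * k) :
    0 ≤ (PySem.List.pyRange n 0 (-1)).foldl csTraceStep p ∧
    (PySem.List.pyRange n 0 (-1)).foldl csTraceStep p < 2 * k := by
  induction n generalizing p with
  | zero =>
    rw [PySem.List.pyRange_neg_one_eq_nil (by omega)]
    exact ⟨hp0, hpk⟩
  | succ n ih =>
    rw [show ((n + 1 : Nat) : Int) = (n : Int) + 1 by push_cast; ring,
      PySem.List.pyRange_neg_one_cons (show (0:Int) < (n : Int) + 1 by omega)]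
    simp only [List.foldl_cons, add_sub_cancel_right]
    obtain ⟨h0, h1⟩ := csTraceStep_bounds k ((n : Int) + 1) p (by omega) (by push_cast at hn; omega) hp0 hpk
    exact ih _ (by omega) h0 h1

theorem csValueAfter_bounds (n : Nat) (k p : Int) (hn : (n : Int) ≤ k)
    (hp0 : 0 ≤ p) (hpk : p < 2 * k) :
    1 ≤ csValueAfter n p ∧ csValueAfter n p ≤ 2 * k := by
  obtain ⟨h0, h1⟩ := csTraceFold_bounds n k p hn hp0 hpk
  unfold csValueAfter
  omega

-- interleaved pair list, re-indexed by output position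
theorem csFlatMapPair (m : Nat) (a b : Nat → Int) :
    (List.range m).flatMap (fun i => [a i, b i])
      = (List.range (2 * m)).map (fun p => if p % 2 = 0 then a (p / 2) else b (p / 2)) := by
  induction m with
  | zero => rfl
  | succ m ih =>
    rw [List.range_succ, List.flatMap_append, ih,
      show 2 * (m + 1) = 2 * m + 1 + 1 by ring, List.range_succ, List.range_succ]
    have h1 : (2 * m) % 2 = 0 := by omega
    have h2 : 2 * m / 2 = m := by omega
    have h3 : (2 * m + 1) % 2 = 1 := by omega
    have h4 : (2 * m + 1) / 2 = m := by omega
    simp [h1, h2, h3, h4]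

-- A's round-m rebuild of L, seen through B's inverse position map
theorem csStepL (k m : Int) (_hm1 : 1 ≤ m) (hmk : m ≤ k)
    (g : Int → Int) (L : List Int)
    (hL : L = (List.range (2 * k).toNat).map (fun (p : Nat) => g (p : Int))) :
    ((PySem.List.pyRange 0 m 1).foldl
        (fun tmp i => (tmp ++ [PySem.List.pyGetD L (i + m) 0]) ++ [PySem.List.pyGetD L i 0]) [])
      ++ PySem.List.slice L (some (2 * m)) none
    = (List.range (2 * k).toNat).map (fun (p : Nat) => g (csTraceStep (p : Int) m)) := by
  have hLlen : L.length = (2 * k).toNat := by rw [hL]; simp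
  have hgetD : ∀ q : Nat, q < (2 * k).toNat → L.getD q 0 = g q := by
    intro q hq
    rw [hL, PySem.List.getD_map_range _ _ _ _ hq]
  -- normalize tmp to an indexed map
  simp only [List.append_assoc, List.singleton_append]
  rw [PySem.List.foldl_append_eq_flatMap
    (fun i => [PySem.List.pyGetD L (i + m) 0, PySem.List.pyGetD L i 0])]
  rw [List.nil_append, PySem.List.pyRange_zero, List.flatMap_map]
  have hcast : ∀ i : Nat, i < m.toNat →
      ([PySem.List.pyGetD L ((i : Int) + m) 0, PySem.List.pyGetD L (i : Int) 0] : List Int)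
        = [L.getD (i + m.toNat) 0, L.getD i 0] := by
    intro i hi
    rw [show (i : Int) + m = ((i + m.toNat : Nat) : Int) by omega,
      PySem.List.pyGetD_natCast, PySem.List.pyGetD_natCast]
  rw [List.flatMap_congr (fun i hi => hcast i (by simpa using List.mem_range.1 hi))]
  rw [csFlatMapPair m.toNat (fun i => L.getD (i + m.toNat) 0) (fun i => L.getD i 0)]
  rw [PySem.List.slice_from L (by omega)]
  -- elementwise comparison
  apply List.ext_getElem
  · simp; omega
  intro p hp1 hp2
  simp only [List.length_map, List.length_range] at hp2
  rw [List.getElem_map, List.getElem_range]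
  by_cases hcase : p < 2 * m.toNat
  · rw [List.getElem_append_left (by simp; omega)]
    rw [List.getElem_map, List.getElem_range]
    have hps : ((p : Int) < 2 * m) := by omega
    have hmod : PySem.Int.mod (p : Int) 2 = ((p % 2 : Nat) : Int) := PySem.Int.mod_natCast p 2
    have hdiv : PySem.Int.floordiv (p : Int) 2 = ((p / 2 : Nat) : Int) := PySem.Int.floordiv_natCast p 2
    unfold csTraceStep
    rw [if_pos hps, hmod, hdiv]
    by_cases he : p % 2 = 0
    · rw [if_pos he, if_pos (show ((p % 2 : Nat) : Int) = 0 by omega)]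
      rw [hgetD (p / 2 + m.toNat) (by omega)]
      congr 1
      push_cast
      omega
    · rw [if_neg he, if_neg (show ¬ ((p % 2 : Nat) : Int) = 0 by omega)]
      rw [hgetD (p / 2) (by omega)]
  · have hlen1 : (List.map
        (fun p => if p % 2 = 0 then L.getD (p / 2 + m.toNat) 0 else L.getD (p / 2) 0)
        (List.range (2 * m.toNat))).length = 2 * m.toNat := by simp
    rw [List.getElem_append_right (by rw [hlen1]; omega)]
    rw [List.getElem_drop]
    have hidx : (2 * m).toNat + (p - (List.map
        (fun p => if p % 2 = 0 then L.getD (p / 2 + m.toNat) 0 else L.getD (p / 2) 0)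
        (List.range (2 * m.toNat))).length) = p := by rw [hlen1]; omega
    have hLg : ∀ (q : Nat) (hq2 : q < L.length), q = p → L[q] = g p := by
      intro q hq2 hqp
      subst hqp
      rw [← List.getD_eq_getElem L 0 hq2]
      exact hgetD q (by omega)
    rw [hLg _ (by rw [hlen1, hLlen]; omega) hidx]
    unfold csTraceStep
    rw [if_neg (by omega)]

@[simp] theorem csHeads_length (n : Nat) : (csHeads n).length = n := by
  unfold csHeads; simp

theorem csHeads_succ (n : Nat) :
    csHeads (n + 1) = csHeads n ++ [csValueAfter ((n : Int) + 1) 0] := by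
  unfold csHeads
  rw [List.range_succ, List.map_append]
  rfl

theorem csGetDSet (l : List Int) (i : Nat) (w : Int) (hi : i < l.length) (j : Nat) :
    (l.set i w).getD j 0 = if j = i then w else l.getD j 0 := by
  simp only [List.getD_eq_getElem?_getD, List.getElem?_set]
  by_cases hji : j = i
  · subst hji; simp [hi]
  · rw [if_neg fun h : i = j => hji h.symm, if_neg hji]

-- the invariant tying A's state after n rounds to B's trace-based descriptions
def CSInv (k : Int) (n : Nat) (st : List Int × List Int × List Int) : Prop :=
  st.1 = (List.range (2 * k).toNat).map (fun (p : Nat) => csValueAfter (n : Int) (p : Int)) ∧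
  st.2.1.length = (2 * k).toNat ∧
  st.2.2.length = (2 * k).toNat ∧
  (∀ j : Nat, j < (2 * k).toNat →
      st.2.2.getD j 0 = ((csHeads n).count ((j : Int) + 1) : Int) ∧
      st.2.1.getD j 0 = ((PySem.List.index? (csHeads n) ((j : Int) + 1)).map
                          (fun i : Nat => (i : Int) + 1)).getD 0)

theorem csStep (k : Int) (hk : 1 ≤ k) (n : Nat) (hn : (n : Int) + 1 ≤ k)
    (st : List Int × List Int × List Int) (h : CSInv k n st) :
    CSInv k (n + 1) (csStepA st ((n : Int) + 1)) := by
  obtain ⟨L, s, f⟩ := st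
  obtain ⟨hLmap, hSLen, hFLen, hSF⟩ := h
  dsimp only [CSInv] at hLmap hSLen hFLen hSF ⊢
  set m : Int := (n : Int) + 1 with hmdef
  simp only [csStepA]
  have hL2 := csStepL k m (by omega) (by omega) (fun p => csValueAfter (n : Int) p) L hLmap
  rw [hL2]
  have hmapEq : (List.range (2 * k).toNat).map (fun (p : Nat) => csValueAfter (n : Int) (csTraceStep (p : Int) m))
      = (List.range (2 * k).toNat).map (fun (p : Nat) => csValueAfter ((n + 1 : Nat) : Int) (p : Int)) := by
    apply List.map_congr_left
    intro p _
    rw [show ((n + 1 : Nat) : Int) = (n : Int) + 1 by push_cast; ring, csValueAfter_succ]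
  have hk2 : 0 < (2 * k).toNat := by omega
  have hhd : PySem.List.pyGetD ((List.range (2 * k).toNat).map
      (fun (p : Nat) => csValueAfter (n : Int) (csTraceStep (p : Int) m))) 0 0
      = csValueAfter m 0 := by
    rw [hmapEq, PySem.List.pyGetD_zero, PySem.List.getD_map_range _ _ _ _ hk2]
    rw [show (((0 : Nat)) : Int) = 0 from rfl, show (((n + 1 : Nat)) : Int) = (n : Int) + 1 by push_cast; ring, hmdef]
  set hd := PySem.List.pyGetD ((List.range (2 * k).toNat).map
      (fun (p : Nat) => csValueAfter (n : Int) (csTraceStep (p : Int) m))) 0 0 with hhddef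
  have hdB : 1 ≤ hd ∧ hd ≤ 2 * k := by
    rw [hhd]
    exact csValueAfter_bounds (n + 1) k 0 (by push_cast; omega) (by omega) (by omega) |>.imp
      (by intro h; exact_mod_cast h) (by intro h; exact_mod_cast h)
  set j0 : Nat := (hd - 1).toNat with hj0def
  have hj0 : (j0 : Int) = hd - 1 := by omega
  have hj0lt : j0 < (2 * k).toNat := by omega
  have hgf : PySem.List.pyGetD f (hd - 1) 0 = f.getD j0 0 := by
    rw [← hj0, PySem.List.pyGetD_natCast]
  have hgs : PySem.List.pyGetD s (hd - 1) 0 = s.getD j0 0 := by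
    rw [← hj0, PySem.List.pyGetD_natCast]
  have hsetf : PySem.List.pySetD f (hd - 1) (PySem.List.pyGetD f (hd - 1) 0 + 1)
      = f.set j0 (f.getD j0 0 + 1) := by
    rw [PySem.List.pySetD_of_nonneg f _ (by omega), hgf]
  have hsets : PySem.List.pySetD s (hd - 1) m = s.set j0 m := by
    rw [PySem.List.pySetD_of_nonneg s _ (by omega)]
  have hcast : ∀ j : Nat, (j : Int) + 1 = hd ↔ j = j0 := by intro j; omega
  have hheads : csHeads (n + 1) = csHeads n ++ [hd] := by
    rw [csHeads_succ, hhd, hmdef]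
  refine ⟨hmapEq, ?_, ?_, ?_⟩
  · split_ifs with h0 <;> simp [hsets, hSLen]
  · simp [hsetf, hFLen]
  · intro j hj
    constructor
    · -- counts
      rw [hsetf, csGetDSet f j0 _ (by omega) j, hheads, List.count_append]
      by_cases hjj : j = j0
      · rw [if_pos hjj, hjj, (hcast j0).2 rfl, (hSF j0 hj0lt).1, (hcast j0).2 rfl]
        simp
      · have hv : (j : Int) + 1 ≠ hd := fun h' => hjj ((hcast j).1 h')
        rw [if_neg hjj, (hSF j hj).1]
        simp only [List.count_cons, List.count_nil, beq_iff_eq]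
        rw [if_neg fun h' => hv h'.symm]
        simp
    · -- first-occurrence round
      rw [hheads]
      have hold := (hSF j0 hj0lt).2
      rw [hj0, show hd - 1 + 1 = hd by ring] at hold
      by_cases h0 : PySem.List.pyGetD s (hd - 1) 0 = 0
      · rw [if_pos h0, hsets]
        have hz : s.getD j0 0 = 0 := by rw [← hgs]; exact h0
        have hnone : PySem.List.index? (csHeads n) hd = none := by
          rcases hin : PySem.List.index? (csHeads n) hd with _ | i
          · rfl
          · simp only [hin, Option.map_some, Option.getD_some] at hold
            omega
        have hnm : hd ∉ csHeads n := (PySem.List.index?_eq_none_iff _ hd).1 hnone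
        rw [csGetDSet s j0 m (by omega) j]
        by_cases hjj : j = j0
        · rw [if_pos hjj, hjj, (hcast j0).2 rfl,
            PySem.List.index?_append_singleton_self (csHeads n) hd hnm, csHeads_length]
          simp [hmdef]
        · have hv : (j : Int) + 1 ≠ hd := fun h' => hjj ((hcast j).1 h')
          rw [if_neg hjj]
          by_cases hmh : ((j : Int) + 1) ∈ csHeads n
          · rw [PySem.List.index?_append_of_mem [hd] hmh]
            exact (hSF j hj).2
          · have hn1 : PySem.List.index? (csHeads n) ((j : Int) + 1) = none :=
              (PySem.List.index?_eq_none_iff _ _).2 hmh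
            have hn2 : PySem.List.index? (csHeads n ++ [hd]) ((j : Int) + 1) = none := by
              rw [PySem.List.index?_eq_none_iff]
              simp [hmh, hv]
            rw [hn2, (hSF j hj).2, hn1]
      · rw [if_neg h0]
        have hz : s.getD j0 0 ≠ 0 := by rw [← hgs]; exact h0
        have hmem0 : hd ∈ csHeads n := by
          by_contra hnm
          rw [(PySem.List.index?_eq_none_iff _ hd).2 hnm] at hold
          exact hz (by rw [hold]; simp)
        by_cases hmh : ((j : Int) + 1) ∈ csHeads n
        · rw [PySem.List.index?_append_of_mem [hd] hmh]
          exact (hSF j hj).2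
        · have hv : (j : Int) + 1 ≠ hd := by
            intro h'; exact hmh (h' ▸ hmem0)
          have hn1 : PySem.List.index? (csHeads n) ((j : Int) + 1) = none :=
            (PySem.List.index?_eq_none_iff _ _).2 hmh
          have hn2 : PySem.List.index? (csHeads n ++ [hd]) ((j : Int) + 1) = none := by
            rw [PySem.List.index?_eq_none_iff]
            simp [hmh, hv]
          rw [hn2, (hSF j hj).2, hn1]

theorem csMain (k : Int) (hk : 1 ≤ k) (n : Nat) (hn : (n : Int) ≤ k) :
    CSInv k n
      ((PySem.List.pyRange 1 ((n : Int) + 1) 1).foldl csStepA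
        (PySem.List.pyRange 1 (2 * k + 1) 1, List.replicate (2 * k).toNat 0, List.replicate (2 * k).toNat 0)) := by
  induction n with
  | zero =>
    rw [PySem.List.pyRange_one_eq_nil (show (((0:Nat) : Int) + 1) ≤ 1 by omega)]
    simp only [List.foldl_nil]
    refine ⟨?_, by simp, by simp, ?_⟩
    · rw [PySem.List.pyRange_one]
      have h1 : (2 * k + 1 - 1) = 2 * k := by ring
      rw [h1]
      apply List.map_congr_left
      intro p _
      unfold csValueAfter
      rw [PySem.List.pyRange_neg_one_eq_nil (by omega)]
      simp only [List.foldl_nil]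
      ring
    · intro j hj
      constructor <;> simp [csHeads, PySem.List.index?_eq_idxOf?]
  | succ n ih =>
    have hn' : (n : Int) ≤ k := by push_cast at hn ⊢; omega
    have hsplit : PySem.List.pyRange 1 ((↑(n + 1) : Int) + 1) 1
        = PySem.List.pyRange 1 ((n : Int) + 1) 1 ++ [(n : Int) + 1] := by
      rw [show ((↑(n + 1) : Int) + 1) = ((n : Int) + 1) + 1 by push_cast; ring]
      exact PySem.List.pyRange_one_succ_right (by omega)
    rw [hsplit, List.foldl_append]
    simp only [List.foldl_cons, List.foldl_nil]
    exact csStep k hk n (by push_cast at hn; omega) _ (ih hn')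

-- ===== VERDICT (by name: the statement is the Claim_ definition above) =====
theorem complete_shuffle_spec : Claim_equal_complete_shuffle := by
  unfold Claim_equal_complete_shuffle
  intro k _ hpre
  have hk : 1 ≤ k := hpre
  have hkn : ((k.toNat : Nat) : Int) = k := by omega
  have inv := csMain k hk k.toNat (by omega)
  obtain ⟨hLmap, hSLen, hFLen, hSF⟩ := inv
  simp only [hkn] at hLmap hSLen hFLen hSF
  unfold Spec_complete_shuffle complete_shuffle complete_shuffle_alt
  dsimp only
  set st := (PySem.List.pyRange 1 (k + 1) 1).foldl csStepA
    (PySem.List.pyRange 1 (2 * k + 1) 1, List.replicate (2 * k).toNat 0, List.replicate (2 * k).toNat 0) with hst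
  -- B's heads list is csHeads k.toNat
  have hheadsB : (PySem.List.pyRange 1 (k + 1) 1).map (fun m => csValueAfter m 0)
      = csHeads k.toNat := by
    rw [PySem.List.pyRange_one, List.map_map]
    unfold csHeads
    have h1 : (k + 1 - 1).toNat = k.toNat := by omega
    rw [h1]
    apply List.map_congr_left
    intro i _
    simp only [Function.comp]
    congr 1
    omega
  have hk2 : 0 < (2 * k).toNat := by omega
  have hkt1 : 1 ≤ k.toNat := by omega
  -- A's head value
  have hhdA : PySem.List.pyGetD st.1 0 0 = csValueAfter k 0 := by
    rw [hLmap, PySem.List.pyGetD_zero, PySem.List.getD_map_range _ _ _ _ hk2]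
    norm_num
  -- B's v = last of csHeads = csValueAfter k 0
  have hne : csHeads k.toNat ≠ [] := by
    intro h
    have := csHeads_length k.toNat
    rw [h] at this
    simp at this
    omega
  have hvB : PySem.List.pyGetD (csHeads k.toNat) (-1) 0 = csValueAfter k 0 := by
    rw [PySem.List.pyGetD_neg_one _ _ hne, List.getLast_eq_getElem]
    unfold csHeads
    simp only [List.length_map, List.length_range]
    rw [List.getElem_map, List.getElem_range]
    congr 1
    omega
  rw [hheadsB, hvB, hhdA]
  set v := csValueAfter k 0 with hvdef
  have hvB2 : 1 ≤ v ∧ v ≤ 2 * k := by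
    have := csValueAfter_bounds k.toNat k 0 (by omega) (by omega) (by omega)
    rw [hkn] at this
    exact this
  set j0 : Nat := (v - 1).toNat with hj0def
  have hj0 : (j0 : Int) = v - 1 := by omega
  have hj0lt : j0 < (2 * k).toNat := by omega
  -- v is a member of csHeads (its last element)
  have hvMem : v ∈ csHeads k.toNat := by
    have := List.getLast_mem hne
    rw [← PySem.List.pyGetD_neg_one _ 0 hne, hvB] at this
    exact this
  rcases hin : PySem.List.index? (csHeads k.toNat) v with _ | i
  · exact absurd ((PySem.List.index?_eq_none_iff _ v).1 hin) (by simp [hvMem])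
  refine Prod.ext ?_ (Prod.ext ?_ ?_)
  · -- first three elements
    dsimp only
    rw [hLmap]
    have hsl : PySem.List.slice ((List.range (2 * k).toNat).map fun (p : Nat) => csValueAfter k (p : Int)) (some 0) (some 3)
        = List.take 3 ((List.range (2 * k).toNat).map fun (p : Nat) => csValueAfter k (p : Int)) := by
      rw [show (some (0:Int)) = some ((0:Nat) : Int) by norm_num,
        PySem.List.slice_toNat _ (by omega) (by omega)]
      simp
    rw [hsl, ← List.map_take, List.take_range]
    rw [PySem.List.pyRange_one]
    have h2 : (min 3 (2 * k) - 0).toNat = min 3 (2 * k).toNat := by omega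
    rw [h2, List.map_map]
    apply List.map_congr_left
    intro p _
    simp only [Function.comp]
    congr 1
    omega
  · -- s component
    dsimp only
    rw [← hj0, PySem.List.pyGetD_natCast, (hSF j0 hj0lt).2,
      show (j0 : Int) + 1 = v by omega, hin]
    simp
  · -- f component
    dsimp only
    rw [← hj0, PySem.List.pyGetD_natCast, (hSF j0 hj0lt).1,
      show (j0 : Int) + 1 = v by omega, PySem.List.count_eq]
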